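-- pv_equiv track=rewrite | github.com/MHThe1/AI-ML-CSE422-LAB-BRACU | LAB_ASS_2/22101107_Md. Mehedi Hasan Tanvir_CSE422_05_Assignment02_Summer2024.py | fitness
-- ===== SOURCE A (Python) =====
-- def fitness(chromo, step, slots):
--   div_list = []
--   st = 0
--   for i in range(slots):
--     stop = st+step
--     div_list.append(chromo[st:stop])
--     st = stop
--
--   penalty = 0
--   penalty += overlap_penalty(div_list, step, slots)
--   penalty += cons_penalty(div_list, step, slots)
--   penalty *= -1
--
--   return penalty
--
-- def overlap_penalty(s_chromo, step, slots):
--   overlap_penalty = 0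
--   val = 0
--   for i in range(slots):
--     val = 0
--     for j in range(step):
--       val += int(s_chromo[i][j])
--     if val != 0:
--       overlap_penalty += val - 1
--   return(overlap_penalty)
--
-- def cons_penalty(s_chromo, step, slots):
--   cons_penalty = 0
--   val = 0
--   for i in range(step):
--     val = 0
--     for j in range(slots):
--       val += int(s_chromo[j][i])
--     if val != 0:
--       cons_penalty += val - 1
--   return(cons_penalty)
-- ===== SOURCE B (Python) =====
-- def fitness(chromo, step, slots):
--     # One row-major traversal: build each row by direct indexing (no slicing),
--     # add its sum to the overlap penalty on the fly and fold it into a running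
--     # column-sum vector; then one reduction over the column sums.
--     colsum = [0] * step
--     overlap = 0
--     for i in range(slots):
--         row = [int(chromo[i * step + j]) for j in range(step)]
--         s = sum(row)
--         if s != 0:
--             overlap += s - 1
--         colsum = [c + v for c, v in zip(colsum, row)]
--     cons = sum(c - 1 for c in colsum if c != 0)
--     return -(overlap + cons)
-- ===== Notes on version B (the rewrite author's own statement) =====
-- stated objective: alternative
-- what changed: B replaces A's three phases (build div_list of slices, then two separate nested double-loops re-scanning the grid by rows and by columns) with a single row-major traversal that indexes the chromosome directly, accumulates the overlap penalty on the fly and folds each row into one running column-sum vector, finished by a single reduction over that vector.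
import Mathlib
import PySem

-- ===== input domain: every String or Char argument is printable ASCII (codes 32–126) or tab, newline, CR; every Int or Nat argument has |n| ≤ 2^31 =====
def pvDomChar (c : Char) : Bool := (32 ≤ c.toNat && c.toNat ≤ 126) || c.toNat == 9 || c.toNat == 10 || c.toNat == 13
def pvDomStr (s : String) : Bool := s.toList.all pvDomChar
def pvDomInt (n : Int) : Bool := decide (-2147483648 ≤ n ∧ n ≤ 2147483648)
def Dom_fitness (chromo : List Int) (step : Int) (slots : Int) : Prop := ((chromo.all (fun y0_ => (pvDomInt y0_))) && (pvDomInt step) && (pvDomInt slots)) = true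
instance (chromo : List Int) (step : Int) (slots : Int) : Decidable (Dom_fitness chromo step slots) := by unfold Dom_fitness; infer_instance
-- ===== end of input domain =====

-- B replaces A's slice-building plus two grid rescans by one row-major indexing pass
-- feeding a running column-sum vector (alternative decomposition, same asymptotic cost).

-- ===== PORT A =====
def overlapPenalty (sChromo : List (List Int)) (step : Int) (slots : Int) : Int :=
  (PySem.List.pyRange 0 slots 1).foldl (fun acc i =>
    let val := (PySem.List.pyRange 0 step 1).foldl
      (fun v j => v + PySem.List.pyGetD (PySem.List.pyGetD sChromo i []) j 0) 0
    if val ≠ 0 then acc + (val - 1) else acc) 0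

def consPenalty (sChromo : List (List Int)) (step : Int) (slots : Int) : Int :=
  (PySem.List.pyRange 0 step 1).foldl (fun acc i =>
    let val := (PySem.List.pyRange 0 slots 1).foldl
      (fun v j => v + PySem.List.pyGetD (PySem.List.pyGetD sChromo j []) i 0) 0
    if val ≠ 0 then acc + (val - 1) else acc) 0

def fitness (chromo : List Int) (step : Int) (slots : Int) : Int :=
  let dl := (PySem.List.pyRange 0 slots 1).foldl
    (fun (p : List (List Int) × Int) _ =>
      let stop := p.2 + step
      (p.1 ++ [PySem.List.slice chromo (some p.2) (some stop)], stop)) ([], 0)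
  let penalty : Int := 0
  let penalty := penalty + overlapPenalty dl.1 step slots
  let penalty := penalty + consPenalty dl.1 step slots
  let penalty := penalty * (-1)
  penalty

-- ===== PORT B =====
def fitness_alt (chromo : List Int) (step : Int) (slots : Int) : Int :=
  let res := (PySem.List.pyRange 0 slots 1).foldl
    (fun (p : List Int × Int) i =>
      let row := (PySem.List.pyRange 0 step 1).map
        (fun j => PySem.List.pyGetD chromo (i * step + j) 0)
      let s := row.sum
      let overlap := if s ≠ 0 then p.2 + (s - 1) else p.2
      (List.zipWith (· + ·) p.1 row, overlap))
    (List.replicate step.toNat 0, 0)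
  let cons := ((res.1.filter (fun c => c ≠ 0)).map (fun c => c - 1)).sum
  Neg.neg (res.2 + cons)

-- ===== PRECONDITION & SPEC =====
-- Pre_ excludes exactly the inputs where A raises IndexError (a row slice shorter than step).
def Pre_fitness (chromo : List Int) (step : Int) (slots : Int) : Prop :=
  0 < step → 0 < slots → slots * step ≤ (chromo.length : Int)
instance (chromo : List Int) (step : Int) (slots : Int) : Decidable (Pre_fitness chromo step slots) := by unfold Pre_fitness; infer_instance

def pvWitness_fitness : List Int × Int × Int := ([1, 0, 1, 1, 0, 1], 3, 2)

def Spec_fitness (chromo : List Int) (step : Int) (slots : Int) (out : Int) : Prop := out = fitness_alt chromo step slots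
instance (chromo : List Int) (step : Int) (slots : Int) (out : Int) : Decidable (Spec_fitness chromo step slots out) := by unfold Spec_fitness; infer_instance

-- ===== CLAIM (what is proved, stated in full; the proofs are below) =====
def Claim_equal_fitness : Prop := ∀ (chromo : List Int) (step : Int) (slots : Int), Dom_fitness chromo step slots → Pre_fitness chromo step slots → Spec_fitness chromo step slots (fitness chromo step slots)


-- ===== LEMMAS AND PROOFS =====

-- value of cell (i,j) of the conceptual slots x step grid
def cellv (chromo : List Int) (s i j : Nat) : Int := chromo.getD (i*s+j) 0

-- B's i-th row
def rowv (chromo : List Int) (s i : Nat) : List Int :=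
  (List.range s).map (fun j => cellv chromo s i j)

-- column sums over the first m rows
def colv (chromo : List Int) (s m : Nat) : List Int :=
  (List.range s).map (fun j => ((List.range m).map (fun i => cellv chromo s i j)).sum)

-- the shared penalty reduction: sum of (v-1) over nonzero v
def pen (l : List Int) : Int :=
  l.foldl (fun acc v => if v ≠ 0 then acc + (v - 1) else acc) 0

theorem pen_eq_filter_sum (l : List Int) :
    ((l.filter (fun c => c ≠ 0)).map (fun c => c - 1)).sum = pen l := by
  suffices h : ∀ (init : Int), l.foldl (fun acc v => if v ≠ 0 then acc + (v - 1) else acc) init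
      = init + ((l.filter (fun c => c ≠ 0)).map (fun c => c - 1)).sum by
    unfold pen; rw [h 0]; exact (zero_add _).symm
  induction l with
  | nil => intro init; simp
  | cons x xs ih =>
    intro init
    rw [List.foldl_cons, ih]
    by_cases hx : x = 0
    · rw [if_neg (by simpa using hx)]
      simp [hx]
    · rw [if_pos hx]
      simp [hx]
      ring

theorem zipWith_map_same {α β γ μ : Type} (f : β → γ → μ) (g : α → β) (h : α → γ) (l : List α) :
    List.zipWith f (l.map g) (l.map h) = l.map (fun x => f (g x) (h x)) := by
  induction l with
  | nil => rfl
  | cons x xs ih => simp [ih]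

theorem foldl_add_eq_sum (l : List Int) :
    l.foldl (fun acc x => acc + x) 0 = l.sum := by
  simpa using PySem.List.foldl_add l id 0

-- A's div_list fold, characterised over an arbitrary driving list (the body ignores the element)
theorem divfold_eq (chromo : List Int) (step : Int) (L : List Int) :
    ∀ (acc : List (List Int)) (st : Int),
      L.foldl (fun (p : List (List Int) × Int) _ =>
          (p.1 ++ [PySem.List.slice chromo (some p.2) (some (p.2 + step))], p.2 + step)) (acc, st)
        = (acc ++ (List.range L.length).map (fun (i : Nat) =>
              PySem.List.slice chromo (some (st + (i : Int) * step)) (some (st + (i : Int) * step + step))),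
           st + (L.length : Int) * step) := by
  induction L with
  | nil => intro acc st; simp
  | cons x xs ih =>
    intro acc st
    rw [List.foldl_cons, ih]
    simp only [Prod.mk.injEq]
    refine ⟨?_, by simp only [List.length_cons]; push_cast; ring⟩
    simp only [List.length_cons, List.range_succ_eq_map, List.map_cons, List.map_map,
      List.append_assoc, List.singleton_append]
    congr 2
    · norm_num
    · apply List.map_congr_left; intro k _
      simp only [Function.comp_apply]; push_cast; ring_nf

-- a full row slice equals B's row, given the grid fits in the chromosome
theorem slice_eq_rowv (chromo : List Int) (s i : Nat) (hfit : i * s + s ≤ chromo.length) :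
    List.take s (List.drop (i * s) chromo) = rowv chromo s i := by
  apply List.ext_getElem
  · simp [rowv]; omega
  · intro j h1 h2
    have hj : j < s := by simpa [rowv] using h2
    have hlt : i * s + j < chromo.length := by omega
    simp [rowv, cellv, List.getElem_take, List.getElem_drop,
      List.getElem?_eq_getElem hlt]

-- B's loop invariant: column sums plus accumulated overlap penalty
theorem altfold_eq (chromo : List Int) (s : Nat) : ∀ (n : Nat),
    (List.range n).foldl (fun (p : List Int × Int) k =>
        (List.zipWith (· + ·) p.1 (rowv chromo s k),
         if (rowv chromo s k).sum ≠ 0 then p.2 + ((rowv chromo s k).sum - 1) else p.2))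
      (List.replicate s 0, 0)
    = (colv chromo s n, pen ((List.range n).map (fun i => (rowv chromo s i).sum))) := by
  intro n
  induction n with
  | zero => simp [colv, pen]
  | succ n ih =>
    rw [List.range_succ, List.foldl_append, ih]
    simp only [List.foldl_cons, List.foldl_nil, Prod.mk.injEq]
    constructor
    · simp only [colv, rowv, zipWith_map_same]
      apply List.map_congr_left; intro j _
      simp [List.range_succ]
    · simp only [pen, List.map_append, List.foldl_append, List.map_cons,
        List.map_nil, List.foldl_cons, List.foldl_nil]

theorem foldl_pair_fix (L : List Int) : ∀ (c : Int),
    L.foldl (fun (p : List Int × Int) _ => (([] : List Int), p.2)) ([], c) = ([], c) := by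
  induction L with
  | nil => intro c; rfl
  | cons x xs ih => intro c; rw [List.foldl_cons]; exact ih c

theorem fitness_trivial_slots (chromo : List Int) (step slots : Int) (h : slots ≤ 0) :
    fitness chromo step slots = 0 := by
  simp [fitness, overlapPenalty, consPenalty, PySem.List.pyRange_one_eq_nil h,
    List.foldl_fixed]

theorem fitness_alt_trivial_slots (chromo : List Int) (step slots : Int) (h : slots ≤ 0) :
    fitness_alt chromo step slots = 0 := by
  simp [fitness_alt, PySem.List.pyRange_one_eq_nil h]

theorem fitness_trivial_step (chromo : List Int) (step slots : Int) (h : step ≤ 0) :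
    fitness chromo step slots = 0 := by
  simp [fitness, overlapPenalty, consPenalty, PySem.List.pyRange_one_eq_nil h,
    List.foldl_fixed]

theorem fitness_alt_trivial_step (chromo : List Int) (step slots : Int) (h : step ≤ 0) :
    fitness_alt chromo step slots = 0 := by
  have hz : step.toNat = 0 := Int.toNat_of_nonpos h
  simp only [fitness_alt, PySem.List.pyRange_one_eq_nil h, hz, List.replicate_zero,
    List.map_nil, List.sum_nil, List.zipWith_nil_right, ne_eq]
  have hb : (fun (p : List Int × Int) (_ : Int) =>
      (([] : List Int), if False then p.2 + (0 - 1) else p.2)) = fun p _ => ([], p.2) := by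
    funext p i; simp
  simp only [not_true_eq_false, hb]
  rw [foldl_pair_fix]
  simp

-- ===== VERDICT (by name: the statement is the Claim_ definition above) =====
theorem fitness_spec : Claim_equal_fitness := by
  intro chromo step slots _ hpre
  unfold Spec_fitness
  by_cases hslots : 0 < slots
  · by_cases hstep : 0 < step
    · -- main case: positive grid that fits in the chromosome
      obtain ⟨s, hs⟩ := Int.eq_ofNat_of_zero_le hstep.le
      obtain ⟨m, hm⟩ := Int.eq_ofNat_of_zero_le hslots.le
      subst hs hm
      have hfit : m * s ≤ chromo.length := by
        have h1 := hpre hstep hslots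
        push_cast at h1
        exact_mod_cast h1
      have hB : fitness_alt chromo s m =
          -(pen ((List.range m).map (fun i => (rowv chromo s i).sum))
            + pen (colv chromo s m)) := by
        have hrow : ∀ k : Nat, (PySem.List.pyRange 0 (s : Int)).map
            (fun j => PySem.List.pyGetD chromo ((k : Int) * (s : Int) + j) 0)
            = rowv chromo s k := by
          intro k
          rw [PySem.List.pyRange_zero_nat, List.map_map]
          apply List.map_congr_left; intro j _
          simp only [Function.comp_apply]
          have hc : (k : Int) * ((s : Nat) : Int) + (j : Int)
              = ((k * s + j : Nat) : Int) := by push_cast; ring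
          rw [hc, PySem.List.pyGetD_natCast]
          rfl
        simp only [fitness_alt, Int.toNat_natCast]
        rw [PySem.List.pyRange_zero_nat m, List.foldl_map]
        simp only [hrow]
        rw [altfold_eq, pen_eq_filter_sum]
      have hA : fitness chromo s m =
          (0 + pen ((List.range m).map (fun i => (rowv chromo s i).sum))
            + pen (colv chromo s m)) * (-1) := by
        simp only [fitness]
        rw [divfold_eq]
        have hlenR : (PySem.List.pyRange 0 (m : Int)).length = m := by
          simp [PySem.List.pyRange_zero_nat]
        have hdl : ([] : List (List Int)) ++ (List.range (PySem.List.pyRange 0 (m : Int)).length).map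
            (fun (i : Nat) => PySem.List.slice chromo (some ((0 : Int) + (i : Int) * (s : Int)))
              (some ((0 : Int) + (i : Int) * (s : Int) + (s : Int))))
            = (List.range m).map (fun i => rowv chromo s i) := by
          rw [List.nil_append, hlenR]
          apply List.map_congr_left; intro i hi
          have him : i < m := List.mem_range.mp hi
          have h0 : (0 : Int) + (i : Int) * (s : Int) = ((i * s : Nat) : Int) := by
            push_cast; ring
          rw [h0, PySem.List.slice_natCast_add]
          apply slice_eq_rowv
          have h2 : (i + 1) * s ≤ m * s := Nat.mul_le_mul_right _ (by omega)
          have h3 : (i + 1) * s = i * s + s := by ring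
          omega
        rw [hdl]
        have hget : ∀ k : Nat, k < m →
            PySem.List.pyGetD ((List.range m).map (fun i => rowv chromo s i))
              (k : Int) [] = rowv chromo s k := by
          intro k hk
          rw [PySem.List.pyGetD_natCast,
            List.getD_eq_getElem _ _ (by simpa using hk)]
          simp
        have hover : overlapPenalty ((List.range m).map (fun i => rowv chromo s i))
            (s : Int) (m : Int)
            = pen ((List.range m).map (fun i => (rowv chromo s i).sum)) := by
          unfold overlapPenalty pen
          rw [PySem.List.pyRange_zero_nat m, List.foldl_map, List.foldl_map]
          apply PySem.List.foldl_congr_mem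
          intro acc k hk
          rw [hget k (List.mem_range.mp hk)]
          have hlenr : ((rowv chromo s k).length : Int) = (s : Int) := by
            simp [rowv]
          have hinner : (PySem.List.pyRange 0 (s : Int)).foldl
              (fun v j => v + PySem.List.pyGetD (rowv chromo s k) j 0) 0
              = (rowv chromo s k).sum := by
            rw [← hlenr, PySem.List.foldl_pyRange_zero_pyGetD', foldl_add_eq_sum]
          rw [hinner]
        have hcons : consPenalty ((List.range m).map (fun i => rowv chromo s i))
            (s : Int) (m : Int) = pen (colv chromo s m) := by
          unfold consPenalty pen colv
          rw [PySem.List.pyRange_zero_nat s, List.foldl_map, List.foldl_map]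
          apply PySem.List.foldl_congr_mem
          intro acc j hj
          have hjs : j < s := List.mem_range.mp hj
          have hinner : (PySem.List.pyRange 0 (m : Int)).foldl
              (fun v k => v + PySem.List.pyGetD
                (PySem.List.pyGetD ((List.range m).map (fun i => rowv chromo s i)) k [])
                (j : Int) 0) 0
              = ((List.range m).map (fun i => cellv chromo s i j)).sum := by
            rw [PySem.List.pyRange_zero_nat m, List.foldl_map]
            have hcongr : ∀ (v : Int), ∀ k ∈ List.range m,
                v + PySem.List.pyGetD
                  (PySem.List.pyGetD ((List.range m).map (fun i => rowv chromo s i)) (k : Int) [])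
                  (j : Int) 0
                = v + cellv chromo s k j := by
              intro v k hk
              rw [hget k (List.mem_range.mp hk), PySem.List.pyGetD_natCast,
                List.getD_eq_getElem _ _ (by simpa [rowv] using hjs)]
              simp [rowv]
            rw [PySem.List.foldl_congr_mem _ _ _ _ hcongr,
              PySem.List.foldl_add _ (fun k => cellv chromo s k j) 0, zero_add]
          rw [hinner]
        rw [hover, hcons]
      rw [hA, hB]
      ring
    · rw [fitness_trivial_step chromo step slots (by omega),
        fitness_alt_trivial_step chromo step slots (by omega)]
  · rw [fitness_trivial_slots chromo step slots (by omega),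
      fitness_alt_trivial_slots chromo step slots (by omega)]
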